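-- pv_equiv track=rewrite | github.com/ATeerioja/AdventOfCode24 | 2/day2.py | solve
-- ===== SOURCE A (Python) =====
-- def solve(list):
--   truthList = []
--
--   for i in range(len(list)):
--     truthListPart = []
--
--     for z in range(len(list[i])):
--       newList = [x for x in list[i]]
--       del newList[z]
--       isTrue = True
--       isGrowing = True
--
--       if(int(newList[0]) - int(newList[1])) > 0:
--         isGrowing = False
--
--       for y in range(len(newList) - 1):
--
--         if(isGrowing == True):
--           if not (0 > int(newList[y]) - int(newList[y + 1]) >= -3):
--             isTrue = False
--
--         if(isGrowing == False):
--           if not (0 < int(newList[y]) - int(newList[y + 1]) <= 3):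
--             isTrue = False
--
--       truthListPart.append(isTrue)
--
--     truthList.append(truthListPart)
--
--
--   return(truthList)
-- ===== SOURCE B (Python) =====
-- def ok_inc(d):
--     return -3 <= d < 0
--
--
-- def ok_dec(d):
--     return 0 < d <= 3
--
--
-- def solve(list):
--     out = []
--     for row in list:
--         n = len(row)
--         diffs = [a - b for a, b in zip(row, row[1:])]
--         inc = [ok_inc(d) for d in diffs]
--         dec = [ok_dec(d) for d in diffs]
--         # prefix scans: incPre[k] == all(inc[:k]), decPre[k] == all(dec[:k])
--         incPre, decPre, ai, ad = [True], [True], True, True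
--         for vi, vd in zip(inc, dec):
--             ai = ai and vi
--             ad = ad and vd
--             incPre.append(ai)
--             decPre.append(ad)
--         # suffix scans: incSuf[k] == all(inc[k:]), decSuf[k] == all(dec[k:])
--         incSufR, decSufR, ai, ad = [True], [True], True, True
--         for vi, vd in zip(reversed(inc), reversed(dec)):
--             ai = ai and vi
--             ad = ad and vd
--             incSufR.append(ai)
--             decSufR.append(ad)
--         incSuf = incSufR[::-1]
--         decSuf = decSufR[::-1]
--         part = []
--         for z in range(n):
--             if z == 0:
--                 ok = incSuf[1] or decSuf[1]
--             elif z == n - 1: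
--                 ok = incPre[n - 2] or decPre[n - 2]
--             else:
--                 b = row[z - 1] - row[z + 1]
--                 ok = (incPre[z - 1] and ok_inc(b) and incSuf[z + 1]) or \
--                      (decPre[z - 1] and ok_dec(b) and decSuf[z + 1])
--             part.append(ok)
--         out.append(part)
--     return out
-- ===== Notes on version B (the rewrite author's own statement) =====
-- stated objective: faster
-- what changed: Instead of rebuilding the report and rescanning it for every deleted index (O(L^2) per report), B computes the difference list once plus prefix/suffix all-increasing/all-decreasing scan arrays, answering each deletion in O(1) via a bridging-difference check.
import Mathlib
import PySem

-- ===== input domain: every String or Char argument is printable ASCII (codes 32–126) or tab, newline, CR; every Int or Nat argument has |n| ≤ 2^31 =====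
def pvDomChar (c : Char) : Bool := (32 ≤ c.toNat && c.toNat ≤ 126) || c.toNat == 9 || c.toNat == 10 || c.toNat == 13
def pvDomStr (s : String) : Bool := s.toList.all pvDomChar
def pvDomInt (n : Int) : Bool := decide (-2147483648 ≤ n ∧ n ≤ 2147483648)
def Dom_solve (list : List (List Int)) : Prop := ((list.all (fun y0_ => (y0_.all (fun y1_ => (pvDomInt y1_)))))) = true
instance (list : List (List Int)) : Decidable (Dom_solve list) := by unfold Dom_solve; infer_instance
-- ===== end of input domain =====

-- B replaces the per-deletion rebuild-and-rescan with one difference list plus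
-- prefix/suffix monotone-scan arrays, answering each deletion in O(1) (asymptotically faster).

-- ===== PORT A =====
-- 'del newList[z]' is ported by hand as take/drop, exact for the indices 0 ≤ z < len produced
-- by range(len(list[i])); newList[0]/newList[1] raise IndexError on rows of length 1 or 2,
-- which Pre_solve excludes, so pyGetD's default value is never the returned value.
def solve (list : List (List Int)) : List (List Bool) :=
  (PySem.List.pyRange 0 list.length 1).foldl (fun truthList i =>
    let row := PySem.List.pyGetD list i []
    let truthListPart := (PySem.List.pyRange 0 row.length 1).foldl (fun truthListPart z =>
      let newList := row.take z.toNat ++ row.drop (z.toNat + 1)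
      let isTrue := true
      let isGrowing := true
      let isGrowing :=
        if PySem.List.pyGetD newList 0 0 - PySem.List.pyGetD newList 1 0 > 0 then false
        else isGrowing
      let isTrue := (PySem.List.pyRange 0 ((newList.length : Int) - 1) 1).foldl (fun isTrue y =>
        let isTrue :=
          if isGrowing = true then
            (if ¬ (0 > PySem.List.pyGetD newList y 0 - PySem.List.pyGetD newList (y + 1) 0 ∧
                   PySem.List.pyGetD newList y 0 - PySem.List.pyGetD newList (y + 1) 0 ≥ -3)
             then false else isTrue)
          else isTrue
        let isTrue :=
          if isGrowing = false then
            (if ¬ (0 < PySem.List.pyGetD newList y 0 - PySem.List.pyGetD newList (y + 1) 0 ∧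
                   PySem.List.pyGetD newList y 0 - PySem.List.pyGetD newList (y + 1) 0 ≤ 3)
             then false else isTrue)
          else isTrue
        isTrue) isTrue
      truthListPart ++ [isTrue]) []
    truthList ++ [truthListPart]) []

-- ===== PORT B =====
def okInc (d : Int) : Bool := (-3 ≤ d) && (d < 0)

def okDec (d : Int) : Bool := (0 < d) && (d ≤ 3)

-- step of the two parallel boolean prefix scans in Source B
def scanStep (st : List Bool × List Bool × Bool × Bool) (v : Bool × Bool) :
    List Bool × List Bool × Bool × Bool :=
  let ai := st.2.2.1 && v.1
  let ad := st.2.2.2 && v.2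
  (st.1 ++ [ai], st.2.1 ++ [ad], ai, ad)

def solve_alt (list : List (List Int)) : List (List Bool) :=
  list.foldl (fun out row =>
    let n := row.length
    -- zip(row, row[1:]) ported as List.zip with drop 1 (exact: zip truncates to the shorter)
    let diffs := (row.zip (row.drop 1)).map (fun p => p.1 - p.2)
    let inc := diffs.map okInc
    let dec := diffs.map okDec
    let s1 := (inc.zip dec).foldl scanStep ([true], [true], true, true)
    let incPre := s1.1
    let decPre := s1.2.1
    let s2 := (inc.reverse.zip dec.reverse).foldl scanStep ([true], [true], true, true)
    let incSuf := s2.1.reverse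
    let decSuf := s2.2.1.reverse
    let part := (PySem.List.pyRange 0 n 1).foldl (fun part z =>
      let ok :=
        if z = 0 then
          PySem.List.pyGetD incSuf 1 true || PySem.List.pyGetD decSuf 1 true
        else if z = (n : Int) - 1 then
          PySem.List.pyGetD incPre ((n : Int) - 2) true ||
          PySem.List.pyGetD decPre ((n : Int) - 2) true
        else
          let b := PySem.List.pyGetD row (z - 1) 0 - PySem.List.pyGetD row (z + 1) 0
          (PySem.List.pyGetD incPre (z - 1) true && okInc b &&
             PySem.List.pyGetD incSuf (z + 1) true) ||
          (PySem.List.pyGetD decPre (z - 1) true && okDec b &&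
             PySem.List.pyGetD decSuf (z + 1) true)
      part ++ [ok]) []
    out ++ [part]) []

-- ===== PRECONDITION & SPEC =====
-- Pre_solve excludes inputs containing a report of length 1 or 2: there Python A raises
-- IndexError reading newList[0]/newList[1] after the deletion.
def Pre_solve (list : List (List Int)) : Prop :=
  ∀ row ∈ list, row.length = 0 ∨ 3 ≤ row.length
instance (list : List (List Int)) : Decidable (Pre_solve list) := by
  unfold Pre_solve; infer_instance

def pvWitness_solve : List (List Int) := [[1, 2, 4, 7], [9, 5, 2, 1], []]

def Spec_solve (list : List (List Int)) (out : List (List Bool)) : Prop := out = solve_alt list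
instance (list : List (List Int)) (out : List (List Bool)) : Decidable (Spec_solve list out) := by
  unfold Spec_solve; infer_instance

-- ===== CLAIM (what is proved, stated in full; the proofs are below) =====
def Claim_equal_solve : Prop :=
  ∀ (list : List (List Int)), Dom_solve list → Pre_solve list → Spec_solve list (solve list)

-- ===== LEMMAS AND PROOFS =====

-- difference list of a report: dstep [a0,a1,...] = [a0-a1, a1-a2, ...]
def dstep : List Int → List Int
  | a :: b :: t => (a - b) :: dstep (b :: t)
  | _ => []

-- the common value both per-deletion checks are reduced to
def chk (row : List Int) (z : Nat) : Bool :=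
  (dstep (row.take z ++ row.drop (z + 1))).all okInc ||
  (dstep (row.take z ++ row.drop (z + 1))).all okDec

-- the body of A's inner loop over z, after the range loops are turned into maps
def AcheckBody (nl : List Int) : Bool :=
  let isGrowing :=
    if PySem.List.pyGetD nl 0 0 - PySem.List.pyGetD nl 1 0 > 0 then false else true
  (PySem.List.pyRange 0 ((nl.length : Int) - 1) 1).foldl (fun isTrue y =>
    let isTrue :=
      if isGrowing = true then
        (if ¬ (0 > PySem.List.pyGetD nl y 0 - PySem.List.pyGetD nl (y + 1) 0 ∧
               PySem.List.pyGetD nl y 0 - PySem.List.pyGetD nl (y + 1) 0 ≥ -3)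
         then false else isTrue)
      else isTrue
    let isTrue :=
      if isGrowing = false then
        (if ¬ (0 < PySem.List.pyGetD nl y 0 - PySem.List.pyGetD nl (y + 1) 0 ∧
               PySem.List.pyGetD nl y 0 - PySem.List.pyGetD nl (y + 1) 0 ≤ 3)
         then false else isTrue)
      else isTrue
    isTrue) true

-- Source B's prefix-scan array of a boolean list: preArr vs !! k = all(vs[:k])
def preArr (vs : List Bool) : List Bool :=
  [true] ++ (List.range vs.length).map (fun j => ((vs.take (j + 1)).all id))

theorem dstep_length (l : List Int) : (dstep l).length = l.length - 1 := by
  induction l using dstep.induct with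
  | case1 a b t ih => simp [dstep, ih]
  | case2 l h => cases l with
    | nil => simp [dstep]
    | cons a t => cases t with
      | nil => simp [dstep]
      | cons b u => exact absurd rfl (h a b u)

theorem dstep_getD (l : List Int) : ∀ (k : Nat), k < (dstep l).length →
    (dstep l).getD k 0 = l.getD k 0 - l.getD (k + 1) 0 := by
  induction l using dstep.induct with
  | case1 a b t ih =>
    intro k hk
    cases k with
    | zero => simp [dstep]
    | succ j =>
      simp only [dstep, List.getD_cons_succ]
      exact ih j (by simpa [dstep] using hk)
  | case2 l h => cases l with
    | nil => intro k hk; simp [dstep] at hk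
    | cons a t => cases t with
      | nil => intro k hk; simp [dstep] at hk
      | cons b u => exact absurd rfl (h a b u)

theorem diffsL_eq_dstep (l : List Int) :
    (l.zip (l.drop 1)).map (fun p => p.1 - p.2) = dstep l := by
  induction l using dstep.induct with
  | case1 a b t ih => simpa [dstep] using ih
  | case2 l h => cases l with
    | nil => simp [dstep]
    | cons a t => cases t with
      | nil => simp [dstep]
      | cons b u => exact absurd rfl (h a b u)

theorem dstep_drop1 (l : List Int) : dstep (l.drop 1) = (dstep l).drop 1 := by
  cases l with
  | nil => simp [dstep]
  | cons a t => cases t with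
    | nil => simp [dstep]
    | cons b u => simp [dstep]

theorem dstep_drop (k : Nat) (l : List Int) : dstep (l.drop k) = (dstep l).drop k := by
  induction k generalizing l with
  | zero => simp
  | succ k ih =>
    rw [show k + 1 = k + 1 from rfl, ← List.drop_drop (i := 1) (j := k),
      dstep_drop1, ih, List.drop_drop]

theorem dstep_take (k : Nat) : ∀ (l : List Int), dstep (l.take (k + 1)) = (dstep l).take k := by
  induction k with
  | zero =>
    intro l
    cases l with
    | nil => simp [dstep]
    | cons a t => cases t with
      | nil => simp [dstep]
      | cons b u => simp [dstep]
  | succ k ih =>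
    intro l
    cases l with
    | nil => simp [dstep]
    | cons a t =>
      cases t with
      | nil => simp [dstep]
      | cons b u =>
        have := ih (b :: u)
        simp only [List.take_succ_cons, dstep] at this ⊢
        simp [this]

theorem dstep_append (xs : List Int) : ∀ (ys : List Int) (hx : xs ≠ []) (hy : ys ≠ []),
    dstep (xs ++ ys) = dstep xs ++ (xs.getLast hx - ys.head hy) :: dstep ys := by
  induction xs with
  | nil => intro ys hx hy; exact absurd rfl hx
  | cons a t ih =>
    intro ys hx hy
    cases t with
    | nil =>
      cases ys with
      | nil => exact absurd rfl hy
      | cons c u => simp [dstep]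
    | cons b s =>
      have := ih ys (by simp) hy
      simp only [List.cons_append, dstep] at this ⊢
      simp [this, List.getLast_cons]

-- a loop that only ever sets the flag to false computes List.all
theorem foldl_ite_all (P : Int → Prop) [DecidablePred P] :
    ∀ (l : List Int) (acc : Bool),
    l.foldl (fun a y => if ¬ P y then false else a) acc = (acc && l.all (fun y => decide (P y))) := by
  intro l
  induction l with
  | nil => intro acc; simp
  | cons x t ih =>
    intro acc
    rw [List.foldl_cons,
      show (if ¬ P x then false else acc) = (acc && decide (P x)) by
        by_cases h : P x <;> simp [h],
      ih, List.all_cons, Bool.and_assoc]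

theorem all_range_getD {α : Type} (d : α) (p : α → Bool) :
    ∀ (l : List α), (List.range l.length).all (fun i => p (l.getD i d)) = l.all p := by
  intro l
  induction l with
  | nil => simp
  | cons x t ih =>
    rw [List.length_cons, List.range_succ_eq_map]
    simp only [List.all_cons, List.all_map]
    simp only [Function.comp_def, Nat.succ_eq_add_one, List.getD_cons_succ, List.getD_cons_zero]
    rw [ih]

theorem all_congr_mem {α : Type} (l : List α) (f g : α → Bool)
    (h : ∀ x ∈ l, f x = g x) : l.all f = l.all g := by
  induction l with
  | nil => rfl
  | cons x t ih =>
    simp only [List.all_cons]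
    rw [h x (by simp), ih (fun y hy => h y (by simp [hy]))]

-- A's index-based inner loop, as List.all over the difference list
theorem pyAll_diffs (nl : List Int) (p : Int → Bool) :
    ((PySem.List.pyRange 0 ((nl.length : Int) - 1) 1).all
      (fun y => p (PySem.List.pyGetD nl y 0 - PySem.List.pyGetD nl (y + 1) 0))) =
    (dstep nl).all p := by
  rw [PySem.List.pyRange_one, List.all_map]
  have ht : ((nl.length : Int) - 1 - 0).toNat = nl.length - 1 := by omega
  rw [ht]
  have hcast : ∀ (k : Nat), ((0 : Int) + (k : Int) + 1) = ((k + 1 : Nat) : Int) := by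
    intro k; push_cast; ring
  calc (List.range (nl.length - 1)).all
          (fun k => p (PySem.List.pyGetD nl (0 + (k : Int)) 0 - PySem.List.pyGetD nl (0 + (k : Int) + 1) 0))
      = (List.range ((dstep nl).length)).all (fun k => p ((dstep nl).getD k 0)) := by
        rw [dstep_length]
        apply all_congr_mem
        intro k hk
        rw [hcast k, zero_add, PySem.List.pyGetD_natCast, PySem.List.pyGetD_natCast]
        rw [dstep_getD nl k (by rw [dstep_length]; exact List.mem_range.mp hk)]
    _ = (dstep nl).all p := all_range_getD 0 p (dstep nl)

theorem decide_inc_eq : (fun d : Int => decide (0 > d ∧ d ≥ -3)) = okInc := by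
  funext d
  by_cases h1 : (-3 : Int) ≤ d <;> by_cases h2 : d < 0 <;> simp [okInc, h1, h2]

theorem decide_dec_eq : (fun d : Int => decide (0 < d ∧ d ≤ 3)) = okDec := by
  funext d
  by_cases h1 : (0 : Int) < d <;> by_cases h2 : d ≤ 3 <;> simp [okDec, h1, h2]

theorem acheck_eq (nl : List Int) (h2 : 2 ≤ nl.length) :
    AcheckBody nl = ((dstep nl).all okInc || (dstep nl).all okDec) := by
  obtain ⟨n0, n1, rest, rfl⟩ : ∃ a b t, nl = a :: b :: t := by
    cases nl with
    | nil => simp at h2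
    | cons a t => cases t with
      | nil => simp at h2
      | cons b u => exact ⟨a, b, u, rfl⟩
  have hd : dstep (n0 :: n1 :: rest) = (n0 - n1) :: dstep (n1 :: rest) := rfl
  have hget0 : PySem.List.pyGetD (n0 :: n1 :: rest) 0 0 = n0 :=
    PySem.List.pyGetD_zero_cons n0 _ 0
  have hget1 : PySem.List.pyGetD (n0 :: n1 :: rest) 1 0 = n1 := by
    have := PySem.List.pyGetD_ofNat (n0 :: n1 :: rest) 1 0 (by simp)
    simpa using this
  unfold AcheckBody
  rw [hget0, hget1]
  by_cases hg : n0 - n1 > 0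
  · rw [if_pos hg]
    simp only [Bool.false_eq_true, if_false, if_true]
    rw [foldl_ite_all (fun y =>
      (0 < PySem.List.pyGetD (n0 :: n1 :: rest) y 0 - PySem.List.pyGetD (n0 :: n1 :: rest) (y + 1) 0 ∧
       PySem.List.pyGetD (n0 :: n1 :: rest) y 0 - PySem.List.pyGetD (n0 :: n1 :: rest) (y + 1) 0 ≤ 3))]
    rw [Bool.true_and]
    rw [show (fun y => decide
        (0 < PySem.List.pyGetD (n0 :: n1 :: rest) y 0 - PySem.List.pyGetD (n0 :: n1 :: rest) (y + 1) 0 ∧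
         PySem.List.pyGetD (n0 :: n1 :: rest) y 0 - PySem.List.pyGetD (n0 :: n1 :: rest) (y + 1) 0 ≤ 3)) =
      (fun y => okDec (PySem.List.pyGetD (n0 :: n1 :: rest) y 0 - PySem.List.pyGetD (n0 :: n1 :: rest) (y + 1) 0))
      from funext fun y => congrFun decide_dec_eq _]
    rw [pyAll_diffs]
    rw [hd, List.all_cons, List.all_cons,
      show okInc (n0 - n1) = false by simp [okInc]; omega]
    simp
  · rw [if_neg hg]
    simp only [Bool.true_eq_false, if_false, if_true]
    rw [foldl_ite_all (fun y =>
      (0 > PySem.List.pyGetD (n0 :: n1 :: rest) y 0 - PySem.List.pyGetD (n0 :: n1 :: rest) (y + 1) 0 ∧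
       PySem.List.pyGetD (n0 :: n1 :: rest) y 0 - PySem.List.pyGetD (n0 :: n1 :: rest) (y + 1) 0 ≥ -3))]
    rw [Bool.true_and]
    rw [show (fun y => decide
        (0 > PySem.List.pyGetD (n0 :: n1 :: rest) y 0 - PySem.List.pyGetD (n0 :: n1 :: rest) (y + 1) 0 ∧
         PySem.List.pyGetD (n0 :: n1 :: rest) y 0 - PySem.List.pyGetD (n0 :: n1 :: rest) (y + 1) 0 ≥ -3)) =
      (fun y => okInc (PySem.List.pyGetD (n0 :: n1 :: rest) y 0 - PySem.List.pyGetD (n0 :: n1 :: rest) (y + 1) 0))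
      from funext fun y => congrFun decide_inc_eq _]
    rw [pyAll_diffs]
    rw [hd, List.all_cons, List.all_cons,
      show okDec (n0 - n1) = false by simp [okDec]; omega]
    simp

-- scan characterization
theorem scan_fold : ∀ (l : List (Bool × Bool)) (p q : List Bool) (a b : Bool),
    l.foldl scanStep (p, q, a, b) =
      (p ++ (List.range l.length).map (fun k => a && ((l.take (k + 1)).map Prod.fst).all id),
       q ++ (List.range l.length).map (fun k => b && ((l.take (k + 1)).map Prod.snd).all id),
       a && ((l.map Prod.fst).all id), b && ((l.map Prod.snd).all id)) := by
  intro l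
  induction l with
  | nil => intro p q a b; simp
  | cons x t ih =>
    intro p q a b
    rw [List.foldl_cons]
    show t.foldl scanStep (p ++ [a && x.1], q ++ [b && x.2], a && x.1, b && x.2) = _
    rw [ih]
    rw [List.length_cons, List.range_succ_eq_map]
    simp [List.map_map, Function.comp_def, Bool.and_assoc]

theorem scan_spec (x y : List Bool) (hlen : x.length = y.length) :
    (x.zip y).foldl scanStep ([true], [true], true, true) =
      (preArr x, preArr y, x.all id, y.all id) := by
  rw [scan_fold]
  have hz : (x.zip y).length = x.length := by rw [List.length_zip]; omega
  have hfst : (x.zip y).map Prod.fst = x := List.map_fst_zip (by omega)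
  have hsnd : (x.zip y).map Prod.snd = y := List.map_snd_zip (by omega)
  simp only [Prod.mk.injEq]
  refine ⟨?_, ?_, ?_, ?_⟩
  · rw [hz]; unfold preArr; congr 1
    apply List.map_congr_left
    intro k _
    rw [List.map_take, hfst, Bool.true_and]
  · rw [show (x.zip y).length = y.length by rw [List.length_zip]; omega]
    unfold preArr; congr 1
    apply List.map_congr_left
    intro k _
    rw [List.map_take, hsnd, Bool.true_and]
  · rw [hfst, Bool.true_and]
  · rw [hsnd, Bool.true_and]

theorem getD_pre (vs : List Bool) (k : Nat) (hk : k ≤ vs.length) :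
    (preArr vs).getD k true = (vs.take k).all id := by
  cases k with
  | zero => simp [preArr]
  | succ j =>
    have hj : j < vs.length := by omega
    simp only [preArr, List.singleton_append, List.getD_cons_succ]
    rw [List.getD_eq_getElem?_getD, List.getElem?_map, List.getElem?_range hj]
    rfl

theorem getD_suf (vs : List Bool) (k : Nat) (hk : k ≤ vs.length) :
    ((preArr vs.reverse).reverse).getD k true = (vs.drop k).all id := by
  have hlen : (preArr vs.reverse).length = vs.length + 1 := by simp [preArr]
  rw [List.getD_eq_getElem?_getD, List.getElem?_reverse (by omega), hlen]
  have harith : vs.length + 1 - 1 - k = vs.length - k := by omega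
  rw [harith, ← List.getD_eq_getElem?_getD (a := true),
    getD_pre vs.reverse (vs.length - k) (by rw [List.length_reverse]; omega),
    List.take_reverse, List.all_reverse,
    show vs.length - (vs.length - k) = k by omega]

-- reduction of the ports to maps of per-deletion checks

-- proof helper: the per-row body of A's outer loop, named
def ApartRaw (row : List Int) : List Bool :=
  (PySem.List.pyRange 0 row.length 1).foldl (fun truthListPart z =>
    let newList := row.take z.toNat ++ row.drop (z.toNat + 1)
    let isTrue := true
    let isGrowing := true
    let isGrowing :=
      if PySem.List.pyGetD newList 0 0 - PySem.List.pyGetD newList 1 0 > 0 then false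
      else isGrowing
    let isTrue := (PySem.List.pyRange 0 ((newList.length : Int) - 1) 1).foldl (fun isTrue y =>
      let isTrue :=
        if isGrowing = true then
          (if ¬ (0 > PySem.List.pyGetD newList y 0 - PySem.List.pyGetD newList (y + 1) 0 ∧
                 PySem.List.pyGetD newList y 0 - PySem.List.pyGetD newList (y + 1) 0 ≥ -3)
           then false else isTrue)
        else isTrue
      let isTrue :=
        if isGrowing = false then
          (if ¬ (0 < PySem.List.pyGetD newList y 0 - PySem.List.pyGetD newList (y + 1) 0 ∧
                 PySem.List.pyGetD newList y 0 - PySem.List.pyGetD newList (y + 1) 0 ≤ 3)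
           then false else isTrue)
        else isTrue
      isTrue) isTrue
    truthListPart ++ [isTrue]) []

theorem apartRaw_eq (row : List Int) :
    ApartRaw row = (List.range row.length).map
      (fun zz => AcheckBody (row.take zz ++ row.drop (zz + 1))) := by
  unfold ApartRaw
  rw [PySem.List.pyRange_zero_natCast, List.foldl_map]
  refine Eq.trans (?_ : _ = List.foldl
    (fun acc zz => acc ++ [AcheckBody (row.take zz ++ row.drop (zz + 1))]) []
    (List.range row.length)) ?_
  · rfl
  · rw [PySem.List.foldl_append_singleton_eq_map, List.nil_append]

theorem solveA_map (list : List (List Int)) :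
    solve list = list.map (fun row => (List.range row.length).map
      (fun zz => AcheckBody (row.take zz ++ row.drop (zz + 1)))) := by
  have h : solve list =
      (PySem.List.pyRange 0 list.length 1).foldl
        (fun acc i => acc ++ [ApartRaw (PySem.List.pyGetD list i [])]) [] := rfl
  rw [h, PySem.List.foldl_pyRange_zero_pyGetD' list []
    (fun acc row => acc ++ [ApartRaw row]) []]
  rw [PySem.List.foldl_append_singleton_eq_map, List.nil_append]
  apply List.map_congr_left
  intro row _
  exact apartRaw_eq row

-- B's per-deletion decision, after the scan arrays are characterized
def Bif (row : List Int) (zz : Nat) : Bool :=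
  if (zz : Int) = 0 then
    PySem.List.pyGetD ((preArr (((dstep row).map okInc).reverse)).reverse) 1 true ||
    PySem.List.pyGetD ((preArr (((dstep row).map okDec).reverse)).reverse) 1 true
  else if (zz : Int) = (row.length : Int) - 1 then
    PySem.List.pyGetD (preArr ((dstep row).map okInc)) ((row.length : Int) - 2) true ||
    PySem.List.pyGetD (preArr ((dstep row).map okDec)) ((row.length : Int) - 2) true
  else
    let b := PySem.List.pyGetD row ((zz : Int) - 1) 0 - PySem.List.pyGetD row ((zz : Int) + 1) 0
    (PySem.List.pyGetD (preArr ((dstep row).map okInc)) ((zz : Int) - 1) true && okInc b &&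
       PySem.List.pyGetD ((preArr (((dstep row).map okInc).reverse)).reverse) ((zz : Int) + 1) true) ||
    (PySem.List.pyGetD (preArr ((dstep row).map okDec)) ((zz : Int) - 1) true && okDec b &&
       PySem.List.pyGetD ((preArr (((dstep row).map okDec).reverse)).reverse) ((zz : Int) + 1) true)

def Brow (row : List Int) : List Bool := (List.range row.length).map (fun zz => Bif row zz)

-- proof helper: the per-row body of B's outer loop, named
def BpartRaw (row : List Int) : List Bool :=
  let n := row.length
  let diffs := (row.zip (row.drop 1)).map (fun p => p.1 - p.2)
  let inc := diffs.map okInc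
  let dec := diffs.map okDec
  let s1 := (inc.zip dec).foldl scanStep ([true], [true], true, true)
  let incPre := s1.1
  let decPre := s1.2.1
  let s2 := (inc.reverse.zip dec.reverse).foldl scanStep ([true], [true], true, true)
  let incSuf := s2.1.reverse
  let decSuf := s2.2.1.reverse
  (PySem.List.pyRange 0 n 1).foldl (fun part z =>
    let ok :=
      if z = 0 then
        PySem.List.pyGetD incSuf 1 true || PySem.List.pyGetD decSuf 1 true
      else if z = (n : Int) - 1 then
        PySem.List.pyGetD incPre ((n : Int) - 2) true ||
        PySem.List.pyGetD decPre ((n : Int) - 2) true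
      else
        let b := PySem.List.pyGetD row (z - 1) 0 - PySem.List.pyGetD row (z + 1) 0
        (PySem.List.pyGetD incPre (z - 1) true && okInc b &&
           PySem.List.pyGetD incSuf (z + 1) true) ||
        (PySem.List.pyGetD decPre (z - 1) true && okDec b &&
           PySem.List.pyGetD decSuf (z + 1) true)
    part ++ [ok]) []

theorem bpartRaw_eq (row : List Int) : BpartRaw row = Brow row := by
  unfold BpartRaw
  simp only [diffsL_eq_dstep]
  rw [scan_spec ((dstep row).map okInc) ((dstep row).map okDec) (by simp)]
  rw [scan_spec ((dstep row).map okInc).reverse ((dstep row).map okDec).reverse (by simp)]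
  rw [PySem.List.pyRange_zero_natCast, List.foldl_map]
  refine Eq.trans (?_ : _ = List.foldl
    (fun acc zz => acc ++ [Bif row zz]) [] (List.range row.length)) ?_
  · rfl
  · rw [PySem.List.foldl_append_singleton_eq_map, List.nil_append]
    rfl

theorem solveB_map (list : List (List Int)) : solve_alt list = list.map Brow := by
  have h : solve_alt list = list.foldl (fun out row => out ++ [BpartRaw row]) [] := rfl
  rw [h, PySem.List.foldl_append_singleton_eq_map, List.nil_append]
  exact List.map_congr_left fun row _ => bpartRaw_eq row

theorem acheck_chk (row : List Int) (h3 : 3 ≤ row.length) (zz : Nat) (hz : zz < row.length) :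
    AcheckBody (row.take zz ++ row.drop (zz + 1)) = chk row zz := by
  have hlen : (row.take zz ++ row.drop (zz + 1)).length = row.length - 1 := by
    simp; omega
  exact acheck_eq _ (by omega)

theorem all_map_id (f : Int → Bool) (X : List Int) : ((X.map f).all id) = X.all f := by
  simp [List.all_map]

theorem bif_chk (row : List Int) (h3 : 3 ≤ row.length) (zz : Nat) (hz : zz < row.length) :
    Bif row zz = chk row zz := by
  have hD : (dstep row).length = row.length - 1 := dstep_length row
  by_cases h0 : zz = 0
  · subst h0
    unfold Bif chk
    rw [if_pos (by norm_num)]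
    rw [show (1 : Int) = ((1 : Nat) : Int) by norm_num,
      PySem.List.pyGetD_natCast, PySem.List.pyGetD_natCast,
      getD_suf ((dstep row).map okInc) 1 (by simp [hD]; omega),
      getD_suf ((dstep row).map okDec) 1 (by simp [hD]; omega)]
    rw [← List.map_drop, ← List.map_drop, all_map_id, all_map_id]
    rw [List.take_zero, List.nil_append, Nat.zero_add, dstep_drop 1 row]
  · by_cases hl : zz = row.length - 1
    · subst hl
      unfold Bif chk
      rw [if_neg (by omega), if_pos (by omega)]
      rw [show ((row.length : Int) - 2) = ((row.length - 2 : Nat) : Int) by omega,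
        PySem.List.pyGetD_natCast, PySem.List.pyGetD_natCast,
        getD_pre ((dstep row).map okInc) (row.length - 2) (by simp [hD]; omega),
        getD_pre ((dstep row).map okDec) (row.length - 2) (by simp [hD]; omega)]
      rw [← List.map_take, ← List.map_take, all_map_id, all_map_id]
      rw [show row.length - 1 + 1 = row.length by omega, List.drop_length, List.append_nil]
      rw [show row.take (row.length - 1) = row.take ((row.length - 2) + 1) by
            rw [show row.length - 2 + 1 = row.length - 1 by omega],
        dstep_take]
    · have hz1 : 1 ≤ zz := by omega
      have hz2 : zz ≤ row.length - 2 := by omega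
      unfold Bif chk
      rw [if_neg (by omega), if_neg (by omega)]
      rw [show ((zz : Int) - 1) = ((zz - 1 : Nat) : Int) by omega,
        show ((zz : Int) + 1) = ((zz + 1 : Nat) : Int) by omega]
      rw [PySem.List.pyGetD_natCast, PySem.List.pyGetD_natCast,
        PySem.List.pyGetD_natCast, PySem.List.pyGetD_natCast,
        PySem.List.pyGetD_natCast, PySem.List.pyGetD_natCast]
      rw [getD_pre ((dstep row).map okInc) (zz - 1) (by simp [hD]; omega),
        getD_pre ((dstep row).map okDec) (zz - 1) (by simp [hD]; omega),
        getD_suf ((dstep row).map okInc) (zz + 1) (by simp [hD]; omega),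
        getD_suf ((dstep row).map okDec) (zz + 1) (by simp [hD]; omega)]
      rw [← List.map_take, ← List.map_take, ← List.map_drop, ← List.map_drop,
        all_map_id, all_map_id, all_map_id, all_map_id]
      have hx : row.take zz ≠ [] := by
        have hlen : (row.take zz).length = zz := by simp [List.length_take]; omega
        intro hcon
        rw [hcon] at hlen
        simp at hlen
        omega
      have hy : row.drop (zz + 1) ≠ [] := by
        have hlen : (row.drop (zz + 1)).length = row.length - (zz + 1) := by simp
        intro hcon
        rw [hcon] at hlen
        simp at hlen
        omega
      rw [dstep_append (row.take zz) (row.drop (zz + 1)) hx hy]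
      have htake : dstep (row.take zz) = (dstep row).take (zz - 1) := by
        rw [show row.take zz = row.take ((zz - 1) + 1) by
              rw [Nat.sub_add_cancel hz1],
          dstep_take]
      have hdrop : dstep (row.drop (zz + 1)) = (dstep row).drop (zz + 1) :=
        dstep_drop (zz + 1) row
      have hlast : (row.take zz).getLast hx = row.getD (zz - 1) 0 := by
        rw [List.getLast_eq_getElem, List.getD_eq_getElem row 0 (n := zz - 1) (by omega)]
        simp only [List.getElem_take]
        congr 1
        simp [List.length_take]
        omega
      have hhead : (row.drop (zz + 1)).head hy = row.getD (zz + 1) 0 := by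
        rw [List.head_drop, List.getD_eq_getElem row 0 (n := zz + 1) (by omega)]
      rw [htake, hdrop, hlast, hhead, List.all_append, List.all_append,
        List.all_cons, List.all_cons]
      simp [Bool.and_assoc]

-- ===== VERDICT (by name: the statement is the Claim_ definition above) =====
theorem solve_spec : Claim_equal_solve := by
  unfold Claim_equal_solve
  intro list _ hpre
  unfold Spec_solve
  rw [solveA_map, solveB_map]
  apply List.map_congr_left
  intro row hrow
  rcases hpre row hrow with h0 | h3
  · simp [h0, Brow]
  · unfold Brow
    apply List.map_congr_left
    intro zz hzz
    rw [acheck_chk row h3 zz (by simpa using hzz),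
      bif_chk row h3 zz (by simpa using hzz)]
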